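-- pv_equiv track=rewrite | github.com/KeithSloan/OpenStudioWorkBench | freecad/openStudio/generate_freecad_feature.py | generate_freecad_code
-- ===== SOURCE A (Python) =====
-- def generate_freecad_code(elements):
--     feature_code = """import FreeCAD, FreeCADGui
-- from PySide2 import QtCore
-- from FreeCAD import Base
-- import Part
--
-- class MyFeature(FreeCAD.FeaturePython):
--     def __init__(self, obj):
--         obj.addProperty("App::PropertyString", "Name", "Data", "Name of the object").Name = "Default"
-- """
--
--     # Generate properties for each element found
--     for name, type_, nested_elements in elements:
--         # Generate a property based on the type
--         if type_ == 'string':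
--             feature_code += f'        obj.addProperty("App::PropertyString", "{name}", "Data", "{name} property")\n'
--         elif type_ == 'int':
--             feature_code += f'        obj.addProperty("App::PropertyInteger", "{name}", "Data", "{name} property")\n'
--         elif type_ == 'float':
--             feature_code += f'        obj.addProperty("App::PropertyFloat", "{name}", "Data", "{name} property")\n'
--         elif type_ == 'complex':
--             feature_code += f'        obj.addProperty("App::PropertyString", "{name}", "Data", "Complex {name} property")\n'
--             # For nested complex types, we can generate additional properties
--             for nested_name, nested_type in nested_elements:
--                 if nested_type == 'string':
--                     feature_code += f'        obj.addProperty("App::PropertyString", "{nested_name}", "{name}", "Nested {nested_name} property")\n'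
--                 elif nested_type == 'int':
--                     feature_code += f'        obj.addProperty("App::PropertyInteger", "{nested_name}", "{name}", "Nested {nested_name} property")\n'
--                 elif nested_type == 'float':
--                     feature_code += f'        obj.addProperty("App::PropertyFloat", "{nested_name}", "{name}", "Nested {nested_name} property")\n'
--
--     # Finalizing the FreeCAD FeaturePython class
--     feature_code += """
--     def execute(self, obj):
--         # Implement the feature calculation here
--         pass
-- """
--
--     return feature_code
-- ===== SOURCE B (Python) =====
-- _PROP = {'string': 'App::PropertyString',
--          'int': 'App::PropertyInteger',
--          'float': 'App::PropertyFloat'}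
--
-- _HEADER = """import FreeCAD, FreeCADGui
-- from PySide2 import QtCore
-- from FreeCAD import Base
-- import Part
--
-- class MyFeature(FreeCAD.FeaturePython):
--     def __init__(self, obj):
--         obj.addProperty("App::PropertyString", "Name", "Data", "Name of the object").Name = "Default"
-- """
--
-- _FOOTER = """
--     def execute(self, obj):
--         # Implement the feature calculation here
--         pass
-- """
--
--
-- def generate_freecad_code(elements):
--     # Stage 1: flatten the element tree into uniform property records with an
--     # explicit worklist (no nested loops): each work item is
--     # (is_top, group, desc_prefix, name, type, nested).
--     records = []
--     stack = [(True, "Data", "", name, t, nested) for name, t, nested in elements]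
--     stack.reverse()
--     while stack:
--         top, group, prefix, name, t, nested = stack.pop()
--         if top and t == 'complex':
--             records.append(("App::PropertyString", name, "Data",
--                             "Complex " + name + " property"))
--             stack.extend((False, name, "Nested ", nn, nt, [])
--                          for nn, nt in reversed(nested))
--         elif t in _PROP:
--             records.append((_PROP[t], name, group, prefix + name + " property"))
--     # Stage 2: render every record with one uniform template.
--     body = "".join('        obj.addProperty("%s", "%s", "%s", "%s")\n' % r
--                    for r in records)
--     return _HEADER + body + _FOOTER
-- ===== Notes on version B (the rewrite author's own statement) =====
-- stated objective: alternative
-- what changed: Replaces A's one-pass string accumulator with nested loops and if/elif chains by two stages: an explicit-worklist (stack) flattening of the element tree into uniform (property, name, group, description) records using a type->property table, then a single uniform-template rendering pass joined onto the header/footer.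
import Mathlib
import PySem

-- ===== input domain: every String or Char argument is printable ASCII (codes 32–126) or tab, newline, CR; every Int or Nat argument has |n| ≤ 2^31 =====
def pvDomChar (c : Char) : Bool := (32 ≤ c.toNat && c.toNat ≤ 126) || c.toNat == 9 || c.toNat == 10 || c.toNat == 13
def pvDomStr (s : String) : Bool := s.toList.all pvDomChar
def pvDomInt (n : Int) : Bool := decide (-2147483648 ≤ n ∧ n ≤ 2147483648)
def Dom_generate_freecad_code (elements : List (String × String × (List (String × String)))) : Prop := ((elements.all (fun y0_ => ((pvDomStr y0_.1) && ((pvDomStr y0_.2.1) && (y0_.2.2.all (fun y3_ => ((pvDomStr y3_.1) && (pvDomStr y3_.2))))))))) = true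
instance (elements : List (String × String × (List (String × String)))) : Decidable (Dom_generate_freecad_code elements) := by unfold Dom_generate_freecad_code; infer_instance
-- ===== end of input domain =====

-- B replaces A's single string-accumulator pass (nested loops, if/elif chains) by two stages:
-- an explicit-worklist flattening of the element tree into uniform property records via a
-- type->property table, then one uniform-template rendering pass (objective: alternative).

-- ===== PORT A =====
def pvHeader : String := "import FreeCAD, FreeCADGui\nfrom PySide2 import QtCore\nfrom FreeCAD import Base\nimport Part\n\nclass MyFeature(FreeCAD.FeaturePython):\n    def __init__(self, obj):\n        obj.addProperty(\"App::PropertyString\", \"Name\", \"Data\", \"Name of the object\").Name = \"Default\"\n"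

def pvFooter : String := "\n    def execute(self, obj):\n        # Implement the feature calculation here\n        pass\n"

-- the inner 'for nested_name, nested_type in nested_elements' loop of A
def pvANested (name : String) (acc : String) (nested : List (String × String)) : String :=
  nested.foldl (fun acc p =>
    if p.2 == "string" then
      acc ++ ("        obj.addProperty(\"App::PropertyString\", \"" ++ p.1 ++ "\", \"" ++ name ++ "\", \"Nested " ++ p.1 ++ " property\")\n")
    else if p.2 == "int" then
      acc ++ ("        obj.addProperty(\"App::PropertyInteger\", \"" ++ p.1 ++ "\", \"" ++ name ++ "\", \"Nested " ++ p.1 ++ " property\")\n")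
    else if p.2 == "float" then
      acc ++ ("        obj.addProperty(\"App::PropertyFloat\", \"" ++ p.1 ++ "\", \"" ++ name ++ "\", \"Nested " ++ p.1 ++ " property\")\n")
    else acc) acc

def generate_freecad_code (elements : List (String × String × (List (String × String)))) : String :=
  (elements.foldl (fun acc e =>
    let name := e.1
    if e.2.1 == "string" then
      acc ++ ("        obj.addProperty(\"App::PropertyString\", \"" ++ name ++ "\", \"Data\", \"" ++ name ++ " property\")\n")
    else if e.2.1 == "int" then
      acc ++ ("        obj.addProperty(\"App::PropertyInteger\", \"" ++ name ++ "\", \"Data\", \"" ++ name ++ " property\")\n")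
    else if e.2.1 == "float" then
      acc ++ ("        obj.addProperty(\"App::PropertyFloat\", \"" ++ name ++ "\", \"Data\", \"" ++ name ++ " property\")\n")
    else if e.2.1 == "complex" then
      pvANested name (acc ++ ("        obj.addProperty(\"App::PropertyString\", \"" ++ name ++ "\", \"Data\", \"Complex " ++ name ++ " property\")\n")) e.2.2
    else acc) pvHeader) ++ pvFooter

-- ===== PORT B =====
def pvProp : PySem.Dict String String :=
  PySem.Dict.ofList [("string", "App::PropertyString"), ("int", "App::PropertyInteger"), ("float", "App::PropertyFloat")]

-- a work item of B's explicit stack: (is_top, group, desc_prefix, name, type, nested)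
structure PvEntry where
  top : Bool
  group : String
  pre : String
  name : String
  ty : String
  nested : List (String × String)
deriving Repr, DecidableEq

-- B's stage-1 'while stack:' loop (Python pops from the end of the list; the
-- head of this list is that end, children are pushed so they come off in order)
def pvLoopB : List PvEntry → List (String × String × String × String) → List (String × String × String × String)
  | [], records => records
  | e :: rest, records =>
    if e.top && e.ty == "complex" then
      pvLoopB ((e.nested.map (fun q => PvEntry.mk false e.name "Nested " q.1 q.2 [])) ++ rest)
              (records ++ [("App::PropertyString", e.name, "Data", "Complex " ++ e.name ++ " property")])
    else match pvProp.get? e.ty with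
      | some p => pvLoopB rest (records ++ [(p, e.name, e.group, e.pre ++ e.name ++ " property")])
      | none => pvLoopB rest records
termination_by st _ => (st.map (fun e => 1 + 2 * e.nested.length)).sum
decreasing_by
  all_goals simp [List.map_append, Function.comp_def]
  omega

-- B's stage-2 uniform template
def pvRender (r : String × String × String × String) : String :=
  "        obj.addProperty(\"" ++ r.1 ++ "\", \"" ++ r.2.1 ++ "\", \"" ++ r.2.2.1 ++ "\", \"" ++ r.2.2.2 ++ "\")\n"

def generate_freecad_code_alt (elements : List (String × String × (List (String × String)))) : String :=
  pvHeader ++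
    String.join ((pvLoopB (elements.map (fun e => PvEntry.mk true "Data" "" e.1 e.2.1 e.2.2)) []).map pvRender) ++
    pvFooter

-- ===== PRECONDITION & SPEC =====
def Spec_generate_freecad_code (elements : List (String × String × (List (String × String)))) (out : String) : Prop := out = generate_freecad_code_alt elements
instance (elements : List (String × String × (List (String × String)))) (out : String) : Decidable (Spec_generate_freecad_code elements out) := by unfold Spec_generate_freecad_code; infer_instance

-- ===== CLAIM (what is proved, stated in full; the proofs are below) =====
def Claim_equal_generate_freecad_code : Prop := ∀ (elements : List (String × String × (List (String × String)))), Dom_generate_freecad_code elements → Spec_generate_freecad_code elements (generate_freecad_code elements)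

-- ===== LEMMAS AND PROOFS =====

lemma pvProp_get? (t : String) :
    pvProp.get? t =
      (if t == "string" then some "App::PropertyString"
       else if t == "int" then some "App::PropertyInteger"
       else if t == "float" then some "App::PropertyFloat"
       else none) := by
  by_cases h1 : t = "string"
  · subst h1; decide
  by_cases h2 : t = "int"
  · subst h2; decide
  by_cases h3 : t = "float"
  · subst h3; decide
  have e1 : ("string" == t) = false := beq_eq_false_iff_ne.mpr (fun h => h1 h.symm)
  have e2 : ("int" == t) = false := beq_eq_false_iff_ne.mpr (fun h => h2 h.symm)
  have e3 : ("float" == t) = false := beq_eq_false_iff_ne.mpr (fun h => h3 h.symm)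
  have f1 : (t == "string") = false := beq_eq_false_iff_ne.mpr h1
  have f2 : (t == "int") = false := beq_eq_false_iff_ne.mpr h2
  have f3 : (t == "float") = false := beq_eq_false_iff_ne.mpr h3
  have hp : pvProp = PySem.Dict.mk [("string", "App::PropertyString"), ("int", "App::PropertyInteger"), ("float", "App::PropertyFloat")] := rfl
  rw [hp]
  simp [PySem.Dict.get?, List.find?, e1, e2, e3, f1, f2, f3]

-- the records one work item contributes (its own, plus — for a complex top item — its children's)
def pvEntryRecs (e : PvEntry) : List (String × String × String × String) :=
  if e.top && e.ty == "complex" then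
    ("App::PropertyString", e.name, "Data", "Complex " ++ e.name ++ " property") ::
      e.nested.filterMap (fun q => (pvProp.get? q.2).map (fun p => (p, q.1, e.name, "Nested " ++ q.1 ++ " property")))
  else ((pvProp.get? e.ty).map (fun p => (p, e.name, e.group, e.pre ++ e.name ++ " property"))).toList

lemma pvLoopB_eq (st : List PvEntry) (records : List (String × String × String × String)) :
    pvLoopB st records = records ++ st.flatMap pvEntryRecs := by
  induction st, records using pvLoopB.induct with
  | case1 records => simp [pvLoopB]
  | case2 e rest records hc ih =>
    simp only [List.map_attach_eq_pmap, List.pmap_eq_map] at ih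
    rw [pvLoopB, if_pos hc, ih]
    have hchild : (e.nested.map (fun q => PvEntry.mk false e.name "Nested " q.1 q.2 [])).flatMap pvEntryRecs
        = e.nested.filterMap (fun q => (pvProp.get? q.2).map (fun p => (p, q.1, e.name, "Nested " ++ q.1 ++ " property"))) := by
      induction e.nested with
      | nil => simp
      | cons q qs ihq =>
        simp only [List.map_cons, List.flatMap_cons, List.filterMap_cons, ihq]
        cases hpq : pvProp.get? q.2 <;> simp [pvEntryRecs, hpq]
    simp [pvEntryRecs, hc, List.flatMap_append, hchild, List.append_assoc]
  | case3 e rest records hc p hp ih =>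
    rw [pvLoopB, if_neg hc]
    simp only [hp, ih]
    simp [pvEntryRecs, hc, hp, List.append_assoc]
  | case4 e rest records hc hp ih =>
    rw [pvLoopB, if_neg hc]
    simp only [hp, ih]
    simp [pvEntryRecs, hc, hp]

lemma str_join_cons (x : String) (xs : List String) : String.join (x :: xs) = x ++ String.join xs := by
  have h : ∀ (l : List String) (a : String), List.foldl (fun r s => r ++ s) a l = a ++ String.join l := by
    intro l
    induction l with
    | nil => intro a; simp [String.join]
    | cons y ys ih =>
      intro a
      show List.foldl _ _ _ = _
      rw [List.foldl_cons, ih]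
      have : String.join (y :: ys) = y ++ String.join ys := by
        show List.foldl _ "" (y :: ys) = _
        rw [List.foldl_cons, ih]
        simp
      rw [this, String.append_assoc]
  show List.foldl _ "" (x :: xs) = _
  rw [List.foldl_cons, h]
  simp

lemma str_join_append (l1 l2 : List String) : String.join (l1 ++ l2) = String.join l1 ++ String.join l2 := by
  induction l1 with
  | nil => simp [String.join]
  | cons x xs ih => simp [str_join_cons, ih, String.append_assoc]

lemma pvMergeS (s : String) : "        obj.addProperty(\"" ++ ("App::PropertyString" ++ ("\", \"" ++ s)) = "        obj.addProperty(\"App::PropertyString\", \"" ++ s := by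
  rw [← String.append_assoc, ← String.append_assoc]; congr 1

lemma pvMergeI (s : String) : "        obj.addProperty(\"" ++ ("App::PropertyInteger" ++ ("\", \"" ++ s)) = "        obj.addProperty(\"App::PropertyInteger\", \"" ++ s := by
  rw [← String.append_assoc, ← String.append_assoc]; congr 1

lemma pvMergeF (s : String) : "        obj.addProperty(\"" ++ ("App::PropertyFloat" ++ ("\", \"" ++ s)) = "        obj.addProperty(\"App::PropertyFloat\", \"" ++ s := by
  rw [← String.append_assoc, ← String.append_assoc]; congr 1

lemma pvMergeN (s : String) : "\", \"" ++ ("Nested " ++ s) = "\", \"Nested " ++ s := by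
  rw [← String.append_assoc]; congr 1

lemma pvMergeC (s : String) : "\", \"Data\", \"" ++ ("Complex " ++ s) = "\", \"Data\", \"Complex " ++ s := by
  rw [← String.append_assoc]; congr 1

lemma pvMergeE (s : String) : "\", \"" ++ ("" ++ s) = "\", \"" ++ s := by
  rw [← String.append_assoc]; congr 1

lemma pvANested_eq (name acc : String) (nested : List (String × String)) :
    pvANested name acc nested =
      acc ++ String.join ((nested.filterMap
        (fun q => (pvProp.get? q.2).map (fun p => (p, q.1, name, "Nested " ++ q.1 ++ " property")))).map pvRender) := by
  induction nested generalizing acc with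
  | nil => simp [pvANested, String.join]
  | cons q rest ih =>
    simp only [pvANested, List.foldl_cons] at ih ⊢
    rw [List.filterMap_cons, pvProp_get? q.2]
    by_cases h1 : q.2 = "string" <;> by_cases h2 : q.2 = "int" <;> by_cases h3 : q.2 = "float" <;>
      simp_all [pvRender, str_join_cons, String.append_assoc, pvMergeS, pvMergeI, pvMergeF, pvMergeN]

lemma pvFold_eq (elements : List (String × String × (List (String × String)))) (acc : String) :
    elements.foldl (fun acc e =>
      let name := e.1
      if e.2.1 == "string" then
        acc ++ ("        obj.addProperty(\"App::PropertyString\", \"" ++ name ++ "\", \"Data\", \"" ++ name ++ " property\")\n")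
      else if e.2.1 == "int" then
        acc ++ ("        obj.addProperty(\"App::PropertyInteger\", \"" ++ name ++ "\", \"Data\", \"" ++ name ++ " property\")\n")
      else if e.2.1 == "float" then
        acc ++ ("        obj.addProperty(\"App::PropertyFloat\", \"" ++ name ++ "\", \"Data\", \"" ++ name ++ " property\")\n")
      else if e.2.1 == "complex" then
        pvANested name (acc ++ ("        obj.addProperty(\"App::PropertyString\", \"" ++ name ++ "\", \"Data\", \"Complex " ++ name ++ " property\")\n")) e.2.2
      else acc) acc
    = acc ++ String.join (((elements.map (fun e => PvEntry.mk true "Data" "" e.1 e.2.1 e.2.2)).flatMap pvEntryRecs).map pvRender) := by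
  induction elements generalizing acc with
  | nil => simp [String.join]
  | cons e rest ih =>
    simp only [List.foldl_cons, List.map_cons, List.flatMap_cons, ih]
    unfold pvEntryRecs
    rw [pvANested_eq]
    simp only [pvProp_get? e.2.1]
    by_cases h1 : e.2.1 = "string" <;> by_cases h2 : e.2.1 = "int" <;>
      by_cases h3 : e.2.1 = "float" <;> by_cases h4 : e.2.1 = "complex" <;>
      simp_all [pvRender, str_join_cons, str_join_append, String.append_assoc,
        pvMergeS, pvMergeI, pvMergeF, pvMergeN, pvMergeC, pvMergeE]

-- ===== VERDICT (by name: the statement is the Claim_ definition above) =====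
theorem generate_freecad_code_spec : Claim_equal_generate_freecad_code := by
  intro elements _
  unfold Spec_generate_freecad_code generate_freecad_code generate_freecad_code_alt
  rw [pvFold_eq, pvLoopB_eq]
  simp [String.append_assoc]
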